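-- pv_equiv track=rewrite | github.com/mosdef-hub/forcefield-utilities | forcefield_utilities/gmso_xml.py | reverse_identifier
-- ===== SOURCE A (Python) =====
-- def reverse_identifier(identifier: str):
--     bond_tokens = ["~", "-", "=", "#"]
--     outStr = ""
--     currentNode = ""
--     for letter in identifier[::-1]:
--         if letter in bond_tokens:
--             outStr += currentNode[::-1]
--             currentNode = ""
--             outStr += letter  # should be a bond
--         else:
--             currentNode += letter
--     if currentNode:
--         outStr += currentNode[::-1]
--     return outStr
-- ===== SOURCE B (Python) =====
-- def reverse_identifier(identifier: str):
--     # Recursive: split at the first bond token; the reversed identifier is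
--     # the reversal of the remainder, then that bond, then the first node
--     # (node letters keep their original order).
--     i = 0
--     while i < len(identifier) and identifier[i] not in "~-=#":
--         i += 1
--     if i == len(identifier):
--         return identifier
--     return reverse_identifier(identifier[i + 1:]) + identifier[i] + identifier[:i]
-- ===== Notes on version B (the rewrite author's own statement) =====
-- stated objective: alternative
-- what changed: B is recursive: it splits the string at the first bond token and returns reverse_identifier(rest) + bond + first_node, instead of A's character-by-character reverse scan with an accumulator state machine that re-reverses each node.
import Mathlib
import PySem

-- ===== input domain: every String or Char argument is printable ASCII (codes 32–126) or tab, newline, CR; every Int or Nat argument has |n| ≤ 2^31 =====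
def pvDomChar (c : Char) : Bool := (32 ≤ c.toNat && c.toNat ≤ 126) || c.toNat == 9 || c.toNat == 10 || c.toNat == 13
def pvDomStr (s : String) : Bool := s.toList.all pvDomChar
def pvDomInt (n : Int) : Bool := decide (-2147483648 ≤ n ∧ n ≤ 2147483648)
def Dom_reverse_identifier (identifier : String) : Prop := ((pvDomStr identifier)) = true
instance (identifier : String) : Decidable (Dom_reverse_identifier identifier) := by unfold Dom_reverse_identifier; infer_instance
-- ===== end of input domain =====

-- B replaces A's reverse-scan state machine by a recursion that splits at the first bond token; objective: alternative decomposition.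

-- ===== PORT A =====
-- loop body of A: state = (outStr, currentNode); letters come from the reversed string
def stepA (s : List Char × List Char) (letter : Char) : List Char × List Char :=
  if letter ∈ ['~', '-', '=', '#'] then (s.1 ++ s.2.reverse ++ [letter], [])
  else (s.1, s.2 ++ [letter])

-- A's trailing 'if currentNode: outStr += currentNode[::-1]'
def finishA (r : List Char × List Char) : List Char :=
  if r.2.isEmpty then r.1 else r.1 ++ r.2.reverse

def reverse_identifier (identifier : String) : String :=
  String.ofList (finishA (List.foldl stepA ([], []) identifier.toList.reverse))

-- ===== PORT B =====
-- B: scan forward to the first bond token (takeWhile/dropWhile = the while loop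
-- collecting identifier[:i] and identifier[i:]); if none, return the string;
-- else recurse on the part after the bond and append bond + first node.
def isBond (c : Char) : Bool := ['~', '-', '=', '#'].contains c

def revIdAux (l : List Char) : List Char :=
  let node := l.takeWhile (fun c => !isBond c)
  match h : l.dropWhile (fun c => !isBond c) with
  | [] => node
  | b :: r => revIdAux r ++ b :: node
termination_by l.length
decreasing_by
  have hle := List.length_dropWhile_le (fun c => !isBond c) l
  rw [h] at hle; simp at hle; omega

def reverse_identifier_alt (identifier : String) : String :=
  String.ofList (revIdAux identifier.toList)

-- ===== PRECONDITION & SPEC =====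
def Spec_reverse_identifier (identifier : String) (out : String) : Prop := out = reverse_identifier_alt identifier
instance (identifier : String) (out : String) : Decidable (Spec_reverse_identifier identifier out) := by unfold Spec_reverse_identifier; infer_instance

-- ===== CLAIM (what is proved, stated in full; the proofs are below) =====
def Claim_equal_reverse_identifier : Prop := ∀ (identifier : String), Dom_reverse_identifier identifier → Spec_reverse_identifier identifier (reverse_identifier identifier)

-- ===== LEMMAS AND PROOFS =====

-- proof-side bridge: the full token list of l (nodes and bonds, in order)
def pvSplit : List Char → List (List Char)
  | [] => [[]]
  | c :: rest =>
    if c ∈ ['~', '-', '=', '#'] then [] :: [c] :: pvSplit rest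
    else
      match pvSplit rest with
      | [] => [[c]]
      | s :: t => (c :: s) :: t

lemma pvSplit_ne_nil (l : List Char) : pvSplit l ≠ [] := by
  cases l with
  | nil => simp [pvSplit]
  | cons c rest =>
    simp only [pvSplit]
    split
    · simp
    · cases h : pvSplit rest <;> simp

-- pvSplit described by the first-bond split
lemma pvSplit_eq (l : List Char) :
    pvSplit l =
      match l.dropWhile (fun c => !isBond c) with
      | [] => [l]
      | b :: r => l.takeWhile (fun c => !isBond c) :: [b] :: pvSplit r := by
  induction l with
  | nil => simp [pvSplit]
  | cons c rest ih =>
    by_cases hc : c ∈ ['~', '-', '=', '#']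
    · have hb : (!isBond c) = false := by
        simp only [isBond, Bool.not_eq_false', List.contains_eq_mem, decide_eq_true_eq]
        exact hc
      simp only [pvSplit, if_pos hc, List.dropWhile_cons, List.takeWhile_cons, hb,
        Bool.false_eq_true, if_false]
    · have hb : (!isBond c) = true := by
        simp only [isBond, Bool.not_eq_true', List.contains_eq_mem, decide_eq_false_iff_not]
        exact hc
      simp only [pvSplit, if_neg hc, List.dropWhile_cons, List.takeWhile_cons, hb, if_true]
      rw [ih]
      cases h : rest.dropWhile (fun c => !isBond c) with
      | nil => simp
      | cons b r => simp

-- B's recursion computes the reversed token list, flattened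
lemma revIdAux_eq (l : List Char) : revIdAux l = (pvSplit l).reverse.flatten := by
  rw [revIdAux, pvSplit_eq]
  cases h : l.dropWhile (fun c => !isBond c) with
  | nil =>
    have hts : l.takeWhile (fun c => !isBond c) = l := by
      have h2 := List.takeWhile_append_dropWhile (p := fun c => !isBond c) (l := l)
      rw [h, List.append_nil] at h2; exact h2
    simp [hts]
  | cons b r =>
    have ih := revIdAux_eq r
    simp [ih]
termination_by l.length
decreasing_by
  have hle := List.length_dropWhile_le (fun c => !isBond c) l
  rw [h] at hle; simp at hle; omega

-- A's foldl over the reversed string, characterized by pvSplit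
lemma foldA_split (l : List Char) :
    List.foldl stepA ([], []) l.reverse =
      ((pvSplit l).tail.reverse.flatten, (pvSplit l).headI.reverse) := by
  induction l with
  | nil => simp [pvSplit]
  | cons c rest ih =>
    rw [List.reverse_cons, List.foldl_append, ih]
    simp only [List.foldl_cons, List.foldl_nil, stepA, pvSplit]
    cases h : pvSplit rest with
    | nil => exact absurd h (pvSplit_ne_nil rest)
    | cons s t =>
      split
      · simp
      · simp

-- ===== VERDICT (by name: the statement is the Claim_ definition above) =====
theorem reverse_identifier_spec : Claim_equal_reverse_identifier := by
  intro identifier _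
  unfold Spec_reverse_identifier reverse_identifier reverse_identifier_alt finishA
  rw [foldA_split, revIdAux_eq]
  cases h : pvSplit identifier.toList with
  | nil => exact absurd h (pvSplit_ne_nil identifier.toList)
  | cons s t =>
    simp only [List.headI, List.tail, List.reverse_cons, List.flatten_append]
    by_cases hs : s = [] <;> simp [hs]
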